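-- pv_equiv track=rewrite | github.com/kosageri13/theoryofalgorithmsprog | 2KosaGergely.py | recognize
-- ===== SOURCE A (Python) =====
-- q0 = 0
--
-- f = {0, 4, 7}
--
-- def delta(q, a):
--     if q == 0:
--         if a == 'a':
--             return {1}
--         elif a =='l':
--             return {2}
--         else:
--             return {0}
--     elif q == 1:
--         if a == 'a':
--             return {0}
--         elif a == 'l':
--             return {5}
--         else:
--             return {1}
--     elif q == 2:
--         if a == 'a':
--             return {1}
--         elif a=='g':
--             return {3}
--         else:
--             return {0}
--     elif q == 3:
--         if a == 'a':
--             return {1}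
--         elif a == 'p':
--             return {4}
--         else:
--             return {0}
--     elif q == 4:
--         if a == 'a':
--             return {1}
--         else:
--             return {4}
--     elif q == 5:
--         if a=='a':
--             return {0}
--         elif a=='g':
--             return {6}
--         else:
--             return {1}
--     elif q == 6:
--         if a=='a':
--             return {0}
--         elif a=='p':
--             return {7}
--         else:
--             return {1}
--     else:
--          if a == 'a':
--              return {0}
--          else:
--              return {7}
--
-- def recognize(word):
--     qs = set([q0])
--     for a in word:
--         qs_prime = set()
--         for q in qs:
--             qs_prime.update(delta(q, a))
--         qs = qs_prime
--     return f.intersection(qs)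
-- ===== SOURCE B (Python) =====
-- q0 = 0
-- f = {0, 4, 7}
--
-- TABLE = {
--     (0, 'a'): 1, (0, 'l'): 2,
--     (1, 'a'): 0, (1, 'l'): 5,
--     (2, 'a'): 1, (2, 'g'): 3,
--     (3, 'a'): 1, (3, 'p'): 4,
--     (4, 'a'): 1,
--     (5, 'a'): 0, (5, 'g'): 6,
--     (6, 'a'): 0, (6, 'p'): 7,
--     (7, 'a'): 0,
-- }
-- DEFAULT = {0: 0, 1: 1, 2: 0, 3: 0, 4: 4, 5: 1, 6: 1, 7: 7}
--
-- def recognize(word):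
--     state = q0
--     for a in word:
--         state = TABLE.get((state, a), DEFAULT[state])
--     return f & {state}
-- ===== Notes on version B (the rewrite author's own statement) =====
-- stated objective: simpler
-- what changed: The automaton is deterministic, so B tracks one integer state advanced through a flat (state,char)-keyed transition table with per-state defaults, removing A's set of states, the inner loop over it, and the eight-way if/elif cascade; the final set is f & {state}.
import Mathlib
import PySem

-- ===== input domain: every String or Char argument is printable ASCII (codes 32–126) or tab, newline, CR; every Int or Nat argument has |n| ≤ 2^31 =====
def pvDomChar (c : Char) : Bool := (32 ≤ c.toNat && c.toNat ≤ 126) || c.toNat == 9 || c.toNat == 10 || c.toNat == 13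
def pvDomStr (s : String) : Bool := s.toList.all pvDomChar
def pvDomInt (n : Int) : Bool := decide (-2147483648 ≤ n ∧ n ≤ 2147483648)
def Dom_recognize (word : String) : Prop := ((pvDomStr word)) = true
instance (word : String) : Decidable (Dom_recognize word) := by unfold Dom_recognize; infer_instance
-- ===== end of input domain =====

-- B replaces A's set-of-states simulation (the automaton is deterministic) by a single
-- integer state advanced through a flat (state,char)-keyed transition table; objective: simpler.

-- ===== PORT A =====
def delta (q : Int) (a : Char) : PySem.Set Int :=
  if q == 0 then
    (if a == 'a' then PySem.Set.ofList [1]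
     else if a == 'l' then PySem.Set.ofList [2]
     else PySem.Set.ofList [0])
  else if q == 1 then
    (if a == 'a' then PySem.Set.ofList [0]
     else if a == 'l' then PySem.Set.ofList [5]
     else PySem.Set.ofList [1])
  else if q == 2 then
    (if a == 'a' then PySem.Set.ofList [1]
     else if a == 'g' then PySem.Set.ofList [3]
     else PySem.Set.ofList [0])
  else if q == 3 then
    (if a == 'a' then PySem.Set.ofList [1]
     else if a == 'p' then PySem.Set.ofList [4]
     else PySem.Set.ofList [0])
  else if q == 4 then
    (if a == 'a' then PySem.Set.ofList [1]
     else PySem.Set.ofList [4])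
  else if q == 5 then
    (if a == 'a' then PySem.Set.ofList [0]
     else if a == 'g' then PySem.Set.ofList [6]
     else PySem.Set.ofList [1])
  else if q == 6 then
    (if a == 'a' then PySem.Set.ofList [0]
     else if a == 'p' then PySem.Set.ofList [7]
     else PySem.Set.ofList [1])
  else
    (if a == 'a' then PySem.Set.ofList [0]
     else PySem.Set.ofList [7])

def fA : PySem.Set Int := PySem.Set.ofList [0, 4, 7]

def recognize (word : String) : List Int :=
  let qs := word.toList.foldl
    (fun qs a => qs.foldl (fun qp q => PySem.Set.update qp (delta q a)) PySem.Set.empty)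
    (PySem.Set.ofList [0])
  PySem.Set.inter fA qs

-- ===== PORT B =====
def tableB : PySem.Dict (Int × Char) Int := PySem.Dict.ofList
  [((0, 'a'), 1), ((0, 'l'), 2),
   ((1, 'a'), 0), ((1, 'l'), 5),
   ((2, 'a'), 1), ((2, 'g'), 3),
   ((3, 'a'), 1), ((3, 'p'), 4),
   ((4, 'a'), 1),
   ((5, 'a'), 0), ((5, 'g'), 6),
   ((6, 'a'), 0), ((6, 'p'), 7),
   ((7, 'a'), 0)]

def defaultB : PySem.Dict Int Int := PySem.Dict.ofList
  [(0, 0), (1, 1), (2, 0), (3, 0), (4, 4), (5, 1), (6, 1), (7, 7)]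

-- DEFAULT[state] never misses (state stays in 0..7 starting from q0 = 0), so getD is exact here
def recognize_alt (word : String) : List Int :=
  let state := word.toList.foldl
    (fun s a => PySem.Dict.getD tableB (s, a) (PySem.Dict.getD defaultB s 0)) 0
  PySem.Set.inter fA (PySem.Set.ofList [state])

-- ===== PRECONDITION & SPEC =====
def Spec_recognize (word : String) (out : List Int) : Prop := out = recognize_alt word
instance (word : String) (out : List Int) : Decidable (Spec_recognize word out) := by unfold Spec_recognize; infer_instance

-- ===== CLAIM (what is proved, stated in full; the proofs are below) =====
def Claim_equal_recognize : Prop := ∀ (word : String), Dom_recognize word → Spec_recognize word (recognize word)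

-- ===== LEMMAS AND PROOFS =====

-- B's one-character transition, named for the proofs
def stepB (q : Int) (a : Char) : Int := PySem.Dict.getD tableB (q, a) (PySem.Dict.getD defaultB q 0)

lemma tableB_mk : tableB = PySem.Dict.mk
  [((0, 'a'), 1), ((0, 'l'), 2),
   ((1, 'a'), 0), ((1, 'l'), 5),
   ((2, 'a'), 1), ((2, 'g'), 3),
   ((3, 'a'), 1), ((3, 'p'), 4),
   ((4, 'a'), 1),
   ((5, 'a'), 0), ((5, 'g'), 6),
   ((6, 'a'), 0), ((6, 'p'), 7),
   ((7, 'a'), 0)] := by decide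

lemma defaultB_mk : defaultB = PySem.Dict.mk
  [(0, 0), (1, 1), (2, 0), (3, 0), (4, 4), (5, 1), (6, 1), (7, 7)] := by decide

lemma get?_mk_nil_tc (x : Int × Char) :
    (PySem.Dict.mk ([] : List ((Int × Char) × Int))).get? x = none := rfl

-- on the reachable states 0..7 the NFA step from a singleton is B's deterministic step
lemma step_eq (q : Int) (hq : q ∈ ([0, 1, 2, 3, 4, 5, 6, 7] : List Int)) (a : Char) :
    delta q a = [stepB q a] ∧ stepB q a ∈ ([0, 1, 2, 3, 4, 5, 6, 7] : List Int) := by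
  fin_cases hq <;>
  ( by_cases ha : a = 'a' <;> by_cases hl : a = 'l' <;> by_cases hg : a = 'g' <;> by_cases hp : a = 'p' <;>
    first
      | (subst ha; decide)
      | (subst hl; decide)
      | (subst hg; decide)
      | (subst hp; decide)
      | (refine ⟨?_, ?_⟩ <;>
          simp [delta, stepB, tableB_mk, defaultB_mk, PySem.Dict.getD, PySem.Dict.get?_mk_cons,
            get?_mk_nil_tc, Ne.symm ha, Ne.symm hl, Ne.symm hg, Ne.symm hp, ha, hl, hg, hp] <;>
          decide) )

-- loop invariant: A's state set stays the singleton of B's state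
lemma loop_eq (l : List Char) (q : Int) (hq : q ∈ ([0, 1, 2, 3, 4, 5, 6, 7] : List Int)) :
    l.foldl (fun qs a => qs.foldl (fun qp q' => PySem.Set.update qp (delta q' a)) PySem.Set.empty) [q]
      = [l.foldl (fun s a => stepB s a) q] := by
  induction l generalizing q with
  | nil => rfl
  | cons a t ih =>
    have h := step_eq q hq a
    simp only [List.foldl_cons, List.foldl_nil]
    rw [h.1]
    have hu : (PySem.Set.empty : PySem.Set Int).update [stepB q a] = [stepB q a] := by
      simp [PySem.Set.update, PySem.Set.empty, PySem.Set.add]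
    rw [hu, ih _ h.2]

-- ===== VERDICT (by name: the statement is the Claim_ definition above) =====
theorem recognize_spec : Claim_equal_recognize := by
  intro word _
  unfold Spec_recognize recognize recognize_alt
  rw [show (PySem.Set.ofList ([0] : List Int)) = [0] from rfl]
  rw [loop_eq word.toList 0 (by simp)]
  rfl
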